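-- pv_equiv track=rewrite | github.com/naz3karim/planguard-cli-oss | src/policycheck/report.py | _render_grouped_findings_md
-- ===== SOURCE A (Python) =====
-- from typing import Any, Dict, Iterable, List, Tuple
--
-- Severity = str
--
-- _SEV_ORDER: Dict[Severity, int] = {
--     "critical": 0,
--     "high": 1,
--     "medium": 2,
--     "low": 3,
--     "info": 4,
--     "unknown": 5,
-- }
--
-- def _safe_str(v: Any, default: str = "") -> str:
--     if v is None:
--         return default
--     try:
--         s = str(v)
--         return s if s else default
--     except Exception:
--         return default
--
-- def _norm_sev(sev: Any) -> Severity: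
--     s = _safe_str(sev, "unknown").strip().lower()
--     return s if s else "unknown"
--
-- def _md_escape_inline(s: str) -> str:
--     # Minimal inline escape
--     return s.replace("`", "\\`")
--
-- def _render_grouped_findings_md(findings: List[Dict[str, Any]]) -> List[str]:
--     """
--     Group by severity then by control_id; each finding formatted like a ticket.
--     """
--     out: List[str] = []
--
--     # Build groups
--     groups: Dict[str, Dict[str, List[Dict[str, Any]]]] = {}
--     for f in findings:
--         sev = _norm_sev(f.get("severity"))
--         cid = _safe_str(f.get("control_id"), "UNKNOWN")
--         groups.setdefault(sev, {}).setdefault(cid, []).append(f)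
--
--     # Order severities
--     sev_sorted = sorted(groups.keys(), key=lambda s: _SEV_ORDER.get(s, _SEV_ORDER["unknown"]))
--
--     for sev in sev_sorted:
--         out.append(f"### {sev.capitalize()}")
--         cids = sorted(groups[sev].keys())
--         for cid in cids:
--             items = groups[sev][cid]
--             # Sort addresses for stability
--             items = sorted(items, key=lambda x: _safe_str(x.get("address"), ""))
--             for f in items:
--                 msg = _safe_str(f.get("message"), "")
--                 addr = _safe_str(f.get("address"), "N/A")
--                 rtype = _safe_str(f.get("resource_type") or f.get("type"), "N/A")
--                 details = _safe_str(f.get("details"), "")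
--                 fix = _safe_str(f.get("fix_hint"), "")
--
--                 out.append(f"- **{_md_escape_inline(cid)}**: {_md_escape_inline(msg)}")
--                 out.append(f"  - address: `{_md_escape_inline(addr)}`")
--                 out.append(f"  - type: `{_md_escape_inline(rtype)}`")
--                 if details:
--                     out.append(f"  - details: `{_md_escape_inline(details)}`")
--                 if fix:
--                     out.append(f"  - fix: {_md_escape_inline(fix)}")
--         out.append("")
--
--     return out
-- ===== SOURCE B (Python) =====
-- from typing import Any, Dict, List
--
-- _SEV_ORDER: Dict[str, int] = {
--     "critical": 0,
--     "high": 1,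
--     "medium": 2,
--     "low": 3,
--     "info": 4,
--     "unknown": 5,
-- }
--
-- def _safe_str(v: Any, default: str = "") -> str:
--     if v is None:
--         return default
--     try:
--         s = str(v)
--         return s if s else default
--     except Exception:
--         return default
--
-- def _norm_sev(sev: Any) -> str:
--     s = _safe_str(sev, "unknown").strip().lower()
--     return s if s else "unknown"
--
-- def _md_escape_inline(s: str) -> str:
--     return s.replace("`", "\\`")
--
-- def _finding_lines(cid: str, f: Dict[str, Any]) -> List[str]:
--     msg = _safe_str(f.get("message"), "")
--     addr = _safe_str(f.get("address"), "N/A")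
--     rtype = _safe_str(f.get("resource_type") or f.get("type"), "N/A")
--     details = _safe_str(f.get("details"), "")
--     fix = _safe_str(f.get("fix_hint"), "")
--     lines = [
--         f"- **{_md_escape_inline(cid)}**: {_md_escape_inline(msg)}",
--         f"  - address: `{_md_escape_inline(addr)}`",
--         f"  - type: `{_md_escape_inline(rtype)}`",
--     ]
--     if details:
--         lines.append(f"  - details: `{_md_escape_inline(details)}`")
--     if fix:
--         lines.append(f"  - fix: {_md_escape_inline(fix)}")
--     return lines
--
-- def _render_grouped_findings_md(findings: List[Dict[str, Any]]) -> List[str]: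
--     out: List[str] = []
--     sevs = dict.fromkeys(_norm_sev(f.get("severity")) for f in findings)
--     for sev in sorted(sevs, key=lambda s: _SEV_ORDER.get(s, 5)):
--         out.append(f"### {sev.capitalize()}")
--         by_sev = [f for f in findings if _norm_sev(f.get("severity")) == sev]
--         cids = dict.fromkeys(_safe_str(f.get("control_id"), "UNKNOWN") for f in by_sev)
--         for cid in sorted(cids):
--             group = [f for f in by_sev if _safe_str(f.get("control_id"), "UNKNOWN") == cid]
--             for f in sorted(group, key=lambda x: _safe_str(x.get("address"), "")):
--                 out.extend(_finding_lines(cid, f))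
--         out.append("")
--     return out
-- ===== Notes on version B (the rewrite author's own statement) =====
-- stated objective: simpler
-- what changed: B drops A's one-pass nested dict-of-dicts grouping (setdefault/setdefault/append) and instead computes each group on demand: deduplicated severity and control-id key lists plus filter passes over the findings, with the per-finding Markdown lines factored into a helper.
import Mathlib
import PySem

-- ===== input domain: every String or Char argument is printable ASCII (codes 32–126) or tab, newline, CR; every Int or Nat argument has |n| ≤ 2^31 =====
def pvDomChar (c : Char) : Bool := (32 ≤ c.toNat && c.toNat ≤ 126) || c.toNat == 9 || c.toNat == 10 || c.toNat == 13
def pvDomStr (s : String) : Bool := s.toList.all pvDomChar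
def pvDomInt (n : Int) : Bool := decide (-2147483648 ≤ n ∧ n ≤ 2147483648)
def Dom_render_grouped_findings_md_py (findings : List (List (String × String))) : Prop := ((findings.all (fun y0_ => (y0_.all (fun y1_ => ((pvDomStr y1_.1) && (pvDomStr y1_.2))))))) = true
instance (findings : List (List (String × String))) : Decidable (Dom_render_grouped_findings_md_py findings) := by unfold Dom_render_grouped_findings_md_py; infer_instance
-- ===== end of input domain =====

-- B replaces A's one-pass nested-dict grouping by dedup-of-keys plus filter passes plus a
-- _finding_lines helper (simpler: no dict bookkeeping); equal return value on every input.

-- ===== shared helpers (module context of both Pythons: _SEV_ORDER, _safe_str, _norm_sev, _md_escape_inline, str.capitalize, dict.get) =====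

-- f.get(k): first-match lookup in the association list standing for the Python dict
def pyGetK : List (String × String) → String → Option String
  | [], _ => none
  | (k, v) :: rest, q => if k == q then some v else pyGetK rest q

-- _safe_str(v, default): v is None or a str here, so str(v) is v itself
def safeStr (v : Option String) (dflt : String) : String :=
  match v with
  | none => dflt
  | some s => if s = "" then dflt else s

-- _norm_sev
def normSev (v : Option String) : String :=
  let s := PySem.Str.lower (PySem.Str.strip (safeStr v "unknown"))
  if s = "" then "unknown" else s

-- _md_escape_inline
def mdEscape (s : String) : String := PySem.Str.replace s "`" "\\`"

-- str.capitalize (exact on the ASCII domain: first char uppercased, the rest lowercased)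
def pyCapitalize (s : String) : String :=
  match s.toList with
  | [] => String.ofList []
  | c :: rest => String.ofList (PySem.Chars.upperChar c :: rest.map PySem.Chars.lowerChar)

-- `a or b` on two Python values that are None or str (truthy = a non-empty string)
def pyOrOpt (a b : Option String) : Option String :=
  match a with
  | none => b
  | some s => if s = "" then b else some s

def sevOrderDict : PySem.Dict String Int :=
  PySem.Dict.ofList [("critical", 0), ("high", 1), ("medium", 2), ("low", 3), ("info", 4), ("unknown", 5)]

def sevOf (f : List (String × String)) : String := normSev (pyGetK f "severity")
def cidOf (f : List (String × String)) : String := safeStr (pyGetK f "control_id") "UNKNOWN"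
def addrKey (f : List (String × String)) : String := safeStr (pyGetK f "address") ""

-- ===== PORT A =====
def render_grouped_findings_md_py (findings : List (List (String × String))) : List String :=
  let groups : PySem.Dict String (PySem.Dict String (List (List (String × String)))) :=
    findings.foldl (fun g f =>
      g.modify (sevOf f) PySem.Dict.empty (fun inner =>
        inner.modify (cidOf f) [] (fun items => items ++ [f]))) PySem.Dict.empty
  let sevSorted := PySem.List.sorted groups.keys
    (fun s => sevOrderDict.getD s (sevOrderDict.getD "unknown" 0)) false
  sevSorted.foldl (fun out sev =>
    let out := out ++ ["### " ++ pyCapitalize sev]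
    -- groups[sev]: sev ranges over groups.keys, so the key is present and getD is exact
    let inner := groups.getD sev PySem.Dict.empty
    let cids := PySem.List.sorted inner.keys (fun c => c) false
    let out := cids.foldl (fun out cid =>
      -- groups[sev][cid]: cid ranges over inner.keys, so getD is exact
      let items := inner.getD cid []
      let items := PySem.List.sorted items (fun x => addrKey x) false
      items.foldl (fun out f =>
        let msg := safeStr (pyGetK f "message") ""
        let addr := safeStr (pyGetK f "address") "N/A"
        let rtype := safeStr (pyOrOpt (pyGetK f "resource_type") (pyGetK f "type")) "N/A"
        let details := safeStr (pyGetK f "details") ""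
        let fix := safeStr (pyGetK f "fix_hint") ""
        let out := out ++ ["- **" ++ mdEscape cid ++ "**: " ++ mdEscape msg]
        let out := out ++ ["  - address: `" ++ mdEscape addr ++ "`"]
        let out := out ++ ["  - type: `" ++ mdEscape rtype ++ "`"]
        let out := if details ≠ "" then out ++ ["  - details: `" ++ mdEscape details ++ "`"] else out
        if fix ≠ "" then out ++ ["  - fix: " ++ mdEscape fix] else out) out) out
    out ++ [""]) []

-- ===== PORT B =====
-- _finding_lines
def findingLines (cid : String) (f : List (String × String)) : List String :=
  let msg := safeStr (pyGetK f "message") ""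
  let addr := safeStr (pyGetK f "address") "N/A"
  let rtype := safeStr (pyOrOpt (pyGetK f "resource_type") (pyGetK f "type")) "N/A"
  let details := safeStr (pyGetK f "details") ""
  let fix := safeStr (pyGetK f "fix_hint") ""
  let lines := ["- **" ++ mdEscape cid ++ "**: " ++ mdEscape msg,
                "  - address: `" ++ mdEscape addr ++ "`",
                "  - type: `" ++ mdEscape rtype ++ "`"]
  let lines := if details ≠ "" then lines ++ ["  - details: `" ++ mdEscape details ++ "`"] else lines
  if fix ≠ "" then lines ++ ["  - fix: " ++ mdEscape fix] else lines

def render_grouped_findings_md_py_alt (findings : List (List (String × String))) : List String :=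
  let sevs := PySem.List.dedup (findings.map sevOf)
  (PySem.List.sorted sevs (fun s => sevOrderDict.getD s 5) false).foldl (fun out sev =>
    let out := out ++ ["### " ++ pyCapitalize sev]
    let bySev := findings.filter (fun f => sevOf f == sev)
    let cids := PySem.List.dedup (bySev.map cidOf)
    let out := (PySem.List.sorted cids (fun c => c) false).foldl (fun out cid =>
      let group := bySev.filter (fun f => cidOf f == cid)
      (PySem.List.sorted group (fun x => addrKey x) false).foldl (fun out f =>
        out ++ findingLines cid f) out) out
    out ++ [""]) []

-- ===== PRECONDITION & SPEC =====
def Spec_render_grouped_findings_md_py (findings : List (List (String × String))) (out : List String) : Prop := out = render_grouped_findings_md_py_alt findings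
instance (findings : List (List (String × String))) (out : List String) : Decidable (Spec_render_grouped_findings_md_py findings out) := by unfold Spec_render_grouped_findings_md_py; infer_instance

-- ===== CLAIM (what is proved, stated in full; the proofs are below) =====
def Claim_equal_render_grouped_findings_md_py : Prop := ∀ (findings : List (List (String × String))), Dom_render_grouped_findings_md_py findings → Spec_render_grouped_findings_md_py findings (render_grouped_findings_md_py findings)

-- ===== LEMMAS AND PROOFS =====

-- A's nested grouping dict, looked up at a severity, is the inner grouping fold over the
-- findings with that severity.
theorem groups_getD (l : List (List (String × String)))
    (d : PySem.Dict String (PySem.Dict String (List (List (String × String))))) (sev : String) :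
    (l.foldl (fun g f =>
        g.modify (sevOf f) PySem.Dict.empty (fun inner =>
          inner.modify (cidOf f) [] (fun items => items ++ [f]))) d).getD sev PySem.Dict.empty
      = (l.filter (fun f => sevOf f == sev)).foldl
          (fun inner f => inner.modify (cidOf f) [] (fun items => items ++ [f]))
          (d.getD sev PySem.Dict.empty) := by
  induction l generalizing d with
  | nil => simp
  | cons f t ih =>
    rw [List.foldl_cons, ih]
    rcases eq_or_ne sev (sevOf f) with h | h
    · rw [h, PySem.Dict.getD_modify_self, List.filter_cons_of_pos (by simp), List.foldl_cons]
    · rw [PySem.Dict.getD_modify_of_ne _ _ _ h,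
        List.filter_cons_of_neg (by simp [(h.symm : sevOf f ≠ sev)])]

-- A's inner (per-severity) dict, looked up at a control id, is the list of that id's findings.
theorem inner_getD (l : List (List (String × String)))
    (d : PySem.Dict String (List (List (String × String)))) (cid : String) :
    (l.foldl (fun inner f => inner.modify (cidOf f) [] (fun items => items ++ [f])) d).getD cid []
      = d.getD cid [] ++ l.filter (fun f => cidOf f == cid) := by
  induction l generalizing d with
  | nil => simp
  | cons f t ih =>
    rw [List.foldl_cons, ih]
    rcases eq_or_ne cid (cidOf f) with h | h
    · rw [h, PySem.Dict.getD_modify_self, List.filter_cons_of_pos (by simp)]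
      simp
    · rw [PySem.Dict.getD_modify_of_ne _ _ _ h,
        List.filter_cons_of_neg (by simp [(h.symm : cidOf f ≠ cid)])]

theorem sev_key_eq :
    (fun s => sevOrderDict.getD s (sevOrderDict.getD "unknown" 0))
      = (fun s => sevOrderDict.getD s 5) := by
  have h : sevOrderDict.getD "unknown" 0 = 5 := by decide
  funext s; rw [h]

-- ===== VERDICT (by name: the statement is the Claim_ definition above) =====
theorem render_grouped_findings_md_py_spec : Claim_equal_render_grouped_findings_md_py := by
  intro findings _
  show render_grouped_findings_md_py findings = render_grouped_findings_md_py_alt findings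
  simp only [render_grouped_findings_md_py, render_grouped_findings_md_py_alt]
  rw [PySem.Dict.keys_foldl_modify_key findings sevOf PySem.Dict.empty
        (fun _ f inner => inner.modify (cidOf f) [] (fun items => items ++ [f])),
      PySem.Dict.keys_empty, PySem.Set.update_nil_left, ← PySem.List.dedup_eq_ofList, sev_key_eq]
  apply PySem.List.foldl_congr_mem
  intro out sev _
  rw [groups_getD, PySem.Dict.getD_empty]
  rw [PySem.Dict.keys_foldl_modify_key _ cidOf ([] : List (List (String × String)))
        (fun _ f items => items ++ [f]),
      PySem.Dict.keys_empty, PySem.Set.update_nil_left, ← PySem.List.dedup_eq_ofList]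
  congr 1
  apply PySem.List.foldl_congr_mem
  intro out cid _
  rw [inner_getD, PySem.Dict.getD_empty, List.nil_append]
  apply PySem.List.foldl_congr_mem
  intro out f _
  simp only [findingLines]
  split_ifs <;> simp
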